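-- pv_equiv track=rewrite | github.com/PsychQuant/macdoc | archive/compare_pdfs.py | find_chapter_ranges
-- ===== SOURCE A (Python) =====
-- def find_chapter_ranges(chapters, total_pages):
--     """Convert chapter starts to (start, end) page ranges."""
--     ranges = []
--     for idx, (page, ch_num, title) in enumerate(chapters):
--         if idx + 1 < len(chapters):
--             end = chapters[idx + 1][0]
--         else:
--             end = total_pages
--         ranges.append((ch_num, title, page, end))
--     return ranges
-- ===== SOURCE B (Python) =====
-- def find_chapter_ranges(chapters, total_pages):
--     """Convert chapter starts to (start, end) page ranges."""
--     ranges = []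
--     end = total_pages
--     for page, ch_num, title in reversed(chapters):
--         ranges.append((ch_num, title, page, end))
--         end = page
--     ranges.reverse()
--     return ranges
-- ===== Notes on version B (the rewrite author's own statement) =====
-- stated objective: alternative
-- what changed: Traverses the chapters in reverse, threading the current chapter's end as an accumulator (initialized to total_pages, updated to each chapter's start), building the output back-to-front and reversing it, which removes A's index arithmetic and next-element lookahead entirely.
import Mathlib
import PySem

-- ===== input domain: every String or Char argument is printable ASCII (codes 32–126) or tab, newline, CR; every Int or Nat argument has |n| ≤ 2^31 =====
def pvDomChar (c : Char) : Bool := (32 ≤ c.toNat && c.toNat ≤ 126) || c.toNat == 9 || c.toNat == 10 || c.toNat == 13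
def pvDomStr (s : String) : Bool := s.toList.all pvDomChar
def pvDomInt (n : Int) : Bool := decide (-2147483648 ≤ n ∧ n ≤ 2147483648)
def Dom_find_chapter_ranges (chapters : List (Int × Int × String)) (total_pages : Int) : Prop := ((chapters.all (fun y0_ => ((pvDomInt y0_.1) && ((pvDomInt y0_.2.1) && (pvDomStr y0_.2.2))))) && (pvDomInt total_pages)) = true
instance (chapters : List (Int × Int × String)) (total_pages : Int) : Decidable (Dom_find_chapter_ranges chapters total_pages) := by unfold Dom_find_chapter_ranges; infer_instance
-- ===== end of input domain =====

-- B traverses the chapters in REVERSE, threading the current end as an accumulator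
-- (total_pages, then each start), building the output back-to-front and reversing it,
-- instead of A's forward index loop with a lookahead bounds check; objective: alternative.

-- ===== PORT A =====
-- index loop: for idx, (page, ch_num, title) in enumerate(chapters): lookahead chapters[idx+1][0]
def find_chapter_ranges (chapters : List (Int × Int × String)) (total_pages : Int) : List (Int × String × Int × Int) :=
  (PySem.List.enumerate chapters).foldl
    (fun ranges p =>
      let idx := p.1
      let page := p.2.1
      let ch_num := p.2.2.1
      let title := p.2.2.2
      let e : Int :=
        if idx + 1 < (chapters.length : Int) then
          -- guarded in range, so Python's chapters[idx+1][0] never raises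
          (PySem.List.pyGetD chapters (idx + 1) (0, 0, "")).1
        else total_pages
      ranges ++ [(ch_num, title, page, e)])
    []

-- ===== PORT B =====
-- reversed(chapters) pass threading (ranges, end); then ranges.reverse()
def find_chapter_ranges_alt (chapters : List (Int × Int × String)) (total_pages : Int) : List (Int × String × Int × Int) :=
  let st := chapters.reverse.foldl
    (fun (acc : List (Int × String × Int × Int) × Int) c =>
      (acc.1 ++ [(c.2.1, c.2.2, c.1, acc.2)], c.1))
    ([], total_pages)
  st.1.reverse

-- ===== PRECONDITION & SPEC =====
def Spec_find_chapter_ranges (chapters : List (Int × Int × String)) (total_pages : Int) (out : List (Int × String × Int × Int)) : Prop := out = find_chapter_ranges_alt chapters total_pages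
instance (chapters : List (Int × Int × String)) (total_pages : Int) (out : List (Int × String × Int × Int)) : Decidable (Spec_find_chapter_ranges chapters total_pages out) := by unfold Spec_find_chapter_ranges; infer_instance

-- ===== CLAIM (what is proved, stated in full; the proofs are below) =====
def Claim_equal_find_chapter_ranges : Prop := ∀ (chapters : List (Int × Int × String)) (total_pages : Int), Dom_find_chapter_ranges chapters total_pages → Spec_find_chapter_ranges chapters total_pages (find_chapter_ranges chapters total_pages)

-- ===== LEMMAS AND PROOFS =====

-- the common recursive characterisation: each chapter paired with the next start (or total_pages)
def pvSpecH : List (Int × Int × String) → Int → List (Int × String × Int × Int)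
  | [], _ => []
  | c :: rest, tp =>
      (c.2.1, c.2.2, c.1, match rest with | [] => tp | r :: _ => r.1) :: pvSpecH rest tp

-- A equals the zip-with-shifted-ends expression
theorem find_chapter_ranges_eq_zip (chapters : List (Int × Int × String)) (total_pages : Int) :
    find_chapter_ranges chapters total_pages =
      (chapters.zip (chapters.tail.map (·.1) ++ [total_pages])).map
        (fun q => (q.1.2.1, q.1.2.2, q.1.1, q.2)) := by
  unfold find_chapter_ranges
  rw [PySem.List.foldl_append_singleton_eq_map]
  apply List.ext_getElem
  · simp [PySem.List.length_enumerate]; omega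
  intro i h1 h2
  have hi : i < chapters.length := by
    simpa [PySem.List.length_enumerate] using h1
  simp only [List.nil_append, List.getElem_map, List.getElem_zip,
    PySem.List.getElem_enumerate, Int.zero_add]
  have hends : (List.map (fun x => x.1) chapters.tail ++ [total_pages])[i]'(by
      simp [List.length_tail]; omega) =
      if (i : Int) + 1 < (chapters.length : Int) then
        (PySem.List.pyGetD chapters ((i : Int) + 1) (0, 0, "")).1
      else total_pages := by
    have hcast : ((i : Int) + 1) = ((i + 1 : Nat) : Int) := by push_cast; ring
    rcases Nat.lt_or_ge (i + 1) chapters.length with h | h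
    · rw [if_pos (by exact_mod_cast h)]
      rw [List.getElem_append_left (by simp [List.length_tail]; omega)]
      simp only [List.getElem_map, List.getElem_tail]
      rw [hcast, PySem.List.pyGetD_natCast, List.getD_eq_getElem _ _ h]
    · have hlen : i + 1 = chapters.length := by omega
      rw [if_neg (by exact_mod_cast Nat.not_lt.mpr h)]
      rw [List.getElem_append_right (by simp [List.length_tail]; omega)]
      simp [List.length_tail]
  exact congrArg (fun e => (chapters[i].2.1, chapters[i].2.2, chapters[i].1, e)) hends.symm

-- the zip expression equals pvSpecH
theorem zip_eq_specH (chapters : List (Int × Int × String)) (total_pages : Int) :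
    (chapters.zip (chapters.tail.map (·.1) ++ [total_pages])).map
        (fun q => (q.1.2.1, q.1.2.2, q.1.1, q.2)) = pvSpecH chapters total_pages := by
  induction chapters with
  | nil => simp [pvSpecH]
  | cons c rest ih =>
      cases rest with
      | nil => simp [pvSpecH]
      | cons r rs =>
          simp only [List.tail_cons, List.map_cons, List.cons_append, List.zip_cons_cons,
            List.map_cons, pvSpecH]
          exact List.cons_eq_cons.mpr ⟨rfl, ih⟩

-- B's reverse fold, unrolled: the list component is the initial list ++ a back-to-front build
def pvRevBuild : List (Int × Int × String) → Int → List (Int × String × Int × Int)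
  | [], _ => []
  | c :: rest, e => (c.2.1, c.2.2, c.1, e) :: pvRevBuild rest c.1

theorem fold_eq_revBuild (rs : List (Int × Int × String))
    (l0 : List (Int × String × Int × Int)) (e0 : Int) :
    (rs.foldl (fun (acc : List (Int × String × Int × Int) × Int) c =>
        (acc.1 ++ [(c.2.1, c.2.2, c.1, acc.2)], c.1)) (l0, e0)).1
      = l0 ++ pvRevBuild rs e0 := by
  induction rs generalizing l0 e0 with
  | nil => simp [pvRevBuild]
  | cons c rest ih =>
      simp only [List.foldl_cons, pvRevBuild]
      rw [ih]
      simp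

theorem specH_append (ys : List (Int × Int × String)) (y : Int × Int × String) (tp : Int) :
    pvSpecH (ys ++ [y]) tp = pvSpecH ys y.1 ++ [(y.2.1, y.2.2, y.1, tp)] := by
  induction ys with
  | nil => simp [pvSpecH]
  | cons x ys ih =>
      cases ys with
      | nil => simp [pvSpecH]
      | cons z zs => simpa [pvSpecH] using ih

theorem revBuild_reverse (l : List (Int × Int × String)) (tp : Int) :
    (pvRevBuild l.reverse tp).reverse = pvSpecH l tp := by
  induction l using List.reverseRecOn generalizing tp with
  | nil => simp [pvRevBuild, pvSpecH]
  | append_singleton ys y ih =>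
      simp only [List.reverse_append, List.reverse_nil,
        List.nil_append, List.singleton_append, pvRevBuild, List.reverse_cons]
      rw [ih, specH_append]

-- ===== VERDICT (by name: the statement is the Claim_ definition above) =====
theorem find_chapter_ranges_spec : Claim_equal_find_chapter_ranges := by
  intro chapters total_pages _
  show find_chapter_ranges chapters total_pages = find_chapter_ranges_alt chapters total_pages
  rw [find_chapter_ranges_eq_zip, zip_eq_specH]
  show _ = (chapters.reverse.foldl
    (fun (acc : List (Int × String × Int × Int) × Int) c =>
      (acc.1 ++ [(c.2.1, c.2.2, c.1, acc.2)], c.1)) ([], total_pages)).1.reverse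
  rw [fold_eq_revBuild, List.nil_append, revBuild_reverse]
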